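-- pv_equiv track=rewrite | github.com/natnaellT/OmegaClaw-Core | src/bio_graph.py | _iter_top_level_atoms
-- ===== SOURCE A (Python) =====
-- from typing import Dict, Iterator, List, Sequence, Set, Tuple, Union
--
-- def _iter_top_level_atoms(text: str) -> Iterator[Tuple[str, int]]:
--     depth = 0
--     start = -1
--     start_line = 1
--     line = 1
--
--     for idx, char in enumerate(text):
--         if char == "\n":
--             line += 1
--
--         if char == "(":
--             if depth == 0:
--                 start = idx
--                 start_line = line
--             depth += 1
--             continue
--
--         if char == ")":
--             if depth == 0:
--                 continue
--             depth -= 1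
--             if depth == 0 and start >= 0:
--                 atom = text[start : idx + 1].strip()
--                 if atom:
--                     yield atom, start_line
--                 start = -1
-- ===== SOURCE B (Python) =====
-- def _iter_top_level_atoms(text):
--     # Two-pass: first collect top-level (start, end) spans by depth only,
--     # then derive atoms and line numbers from the spans.
--     spans = []
--     depth = 0
--     start = 0
--     for idx, ch in enumerate(text):
--         if ch == '(':
--             if depth == 0:
--                 start = idx
--             depth += 1
--         elif ch == ')':
--             if depth == 1:
--                 spans.append((start, idx))
--             if depth > 0:
--                 depth -= 1
--     for s, e in spans:
--         atom = text[s:e + 1].strip()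
--         if atom:
--             yield atom, text[:s].count('\n') + 1
-- ===== Notes on version B (the rewrite author's own statement) =====
-- stated objective: alternative
-- what changed: B separates structural span-finding from output derivation: a first pass collects top-level (start,end) index pairs tracking only depth, a second pass computes each atom and its line number (counting newlines before the span start) from the text, instead of A's single fused scan that maintains an incremental line counter and yields while scanning.
import Mathlib
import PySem

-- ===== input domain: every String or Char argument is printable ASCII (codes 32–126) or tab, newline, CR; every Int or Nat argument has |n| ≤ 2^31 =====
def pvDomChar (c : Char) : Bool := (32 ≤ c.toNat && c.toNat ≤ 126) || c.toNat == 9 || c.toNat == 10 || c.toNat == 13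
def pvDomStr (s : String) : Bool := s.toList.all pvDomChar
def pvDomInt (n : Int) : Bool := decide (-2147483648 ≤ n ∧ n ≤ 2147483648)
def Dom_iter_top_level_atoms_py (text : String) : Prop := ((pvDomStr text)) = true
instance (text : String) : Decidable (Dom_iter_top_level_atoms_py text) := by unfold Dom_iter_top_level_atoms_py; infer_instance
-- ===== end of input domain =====

-- B is a two-pass alternative (span collection, then atom/line derivation); same return value as A.

-- ===== PORT A =====
-- the fused single scan of A: state (depth, start, start_line, line), yields on closing to depth 0
def pvAAux (text : List Char) (cs : List Char) (idx : Nat)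
    (depth start start_line line : Int) : List (String × Int) :=
  match cs with
  | [] => []
  | c :: rest =>
    let line' := if c = '\n' then line + 1 else line
    if c = '(' then
      if depth = 0 then pvAAux text rest (idx + 1) (depth + 1) (idx : Int) line' line'
      else pvAAux text rest (idx + 1) (depth + 1) start start_line line'
    else if c = ')' then
      if depth = 0 then pvAAux text rest (idx + 1) depth start start_line line'
      else if depth - 1 = 0 ∧ 0 ≤ start then
        let atom := String.ofList (PySem.Chars.strip
          (PySem.List.slice text (some start) (some ((idx : Int) + 1))))
        (if atom ≠ "" then [(atom, start_line)] else []) ++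
          pvAAux text rest (idx + 1) (depth - 1) (-1) start_line line'
      else pvAAux text rest (idx + 1) (depth - 1) start start_line line'
    else pvAAux text rest (idx + 1) depth start start_line line'

def iter_top_level_atoms_py (text : String) : List (String × Int) :=
  pvAAux text.toList text.toList 0 0 (-1) 1 1

-- ===== PORT B =====
-- pass 1 of B: collect top-level (start, end) spans, tracking only the depth
def pvSpans (cs : List Char) (idx : Nat) (depth : Int) (start : Nat) : List (Nat × Nat) :=
  match cs with
  | [] => []
  | c :: rest =>
    if c = '(' then
      pvSpans rest (idx + 1) (depth + 1) (if depth = 0 then idx else start)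
    else if c = ')' then
      if depth = 1 then (start, idx) :: pvSpans rest (idx + 1) 0 start
      else if 0 < depth then pvSpans rest (idx + 1) (depth - 1) start
      else pvSpans rest (idx + 1) depth start
    else pvSpans rest (idx + 1) depth start

-- pass 2 of B; text[:s].count('\n') is a single-character str.count, ported exactly as List.count
def pvEmit (text : List Char) (sp : List (Nat × Nat)) : List (String × Int) :=
  sp.foldr (fun se acc =>
    let atom := String.ofList (PySem.Chars.strip
      (PySem.List.slice text (some (se.1 : Int)) (some ((se.2 : Int) + 1))))
    if atom ≠ "" then (atom, ((text.take se.1).count '\n' : Int) + 1) :: acc else acc) []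

def iter_top_level_atoms_py_alt (text : String) : List (String × Int) :=
  pvEmit text.toList (pvSpans text.toList 0 0 0)

-- ===== PRECONDITION & SPEC =====
def Spec_iter_top_level_atoms_py (text : String) (out : List (String × Int)) : Prop := out = iter_top_level_atoms_py_alt text
instance (text : String) (out : List (String × Int)) : Decidable (Spec_iter_top_level_atoms_py text out) := by unfold Spec_iter_top_level_atoms_py; infer_instance

-- ===== CLAIM (what is proved, stated in full; the proofs are below) =====
def Claim_equal_iter_top_level_atoms_py : Prop := ∀ (text : String), Dom_iter_top_level_atoms_py text → Spec_iter_top_level_atoms_py text (iter_top_level_atoms_py text)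

-- ===== LEMMAS AND PROOFS =====

-- newline count over a prefix grows by one exactly when the next character is '\n'
theorem pv_count_take_succ (text : List Char) (idx : Nat) (c : Char) (rest : List Char)
    (h : text.drop idx = c :: rest) :
    (text.take (idx + 1)).count '\n'
      = (text.take idx).count '\n' + (if c = '\n' then 1 else 0) := by
  have hget : text[idx]? = some c := by
    have h0 : (text.drop idx)[0]? = some c := by rw [h]; rfl
    simpa using h0
  rw [List.take_add_one, hget]
  by_cases hc : c = '\n' <;> simp [hc, List.count_append]

-- unfolding of B's second pass on a cons of the span list
theorem pvEmit_cons (text : List Char) (s e : Nat) (sp : List (Nat × Nat)) :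
    pvEmit text ((s, e) :: sp)
      = (if String.ofList (PySem.Chars.strip
            (PySem.List.slice text (some (s : Int)) (some ((e : Int) + 1)))) ≠ "" then
          [(String.ofList (PySem.Chars.strip
            (PySem.List.slice text (some (s : Int)) (some ((e : Int) + 1)))),
            ((text.take s).count '\n' : Int) + 1)]
        else []) ++ pvEmit text sp := by
  simp only [pvEmit, List.foldr_cons]
  split_ifs <;> simp

-- main invariant: A's fused scan equals B's emit over B's spans
set_option maxHeartbeats 1000000 in
theorem pv_main (text : List Char) (cs : List Char) (idx : Nat)
    (depth start_line line : Int) (startA : Int) (startB : Nat)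
    (hcs : cs = text.drop idx)
    (hd : 0 ≤ depth)
    (hinv : 0 < depth → startA = (startB : Int) ∧
      start_line = ((text.take startB).count '\n' : Int) + 1)
    (hline : line = ((text.take idx).count '\n' : Int) + 1) :
    pvAAux text cs idx depth startA start_line line
      = pvEmit text (pvSpans cs idx depth startB) := by
  induction cs generalizing idx depth startA startB start_line line with
  | nil => simp [pvAAux, pvSpans, pvEmit]
  | cons c rest ih =>
    have hrest : rest = text.drop (idx + 1) := by
      have h := congrArg List.tail hcs
      simpa [List.tail_drop] using h
    have hstep := pv_count_take_succ text idx c rest hcs.symm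
    have hline' : (if c = '\n' then line + 1 else line)
        = ((text.take (idx + 1)).count '\n' : Int) + 1 := by
      rw [hstep]; split_ifs with hc <;> simp [hline]
    by_cases hpar : c = '('
    · -- opening parenthesis
      subst hpar
      have hl : (if ('(' : Char) = '\n' then line + 1 else line) = line :=
        if_neg (by decide)
      rw [hl] at hline'
      by_cases hd0 : depth = 0
      · simp only [pvAAux, pvSpans, hl, if_pos hd0]
        exact ih (idx + 1) (depth + 1) line line (idx : Int) idx hrest (by omega)
          (fun _ => ⟨rfl, hline⟩) hline'
      · simp only [pvAAux, pvSpans, hl, if_neg hd0]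
        exact ih (idx + 1) (depth + 1) start_line line startA startB hrest (by omega)
          (fun _ => hinv (by omega)) hline'
    · by_cases hclo : c = ')'
      · -- closing parenthesis
        subst hclo
        have hl : (if (')' : Char) = '\n' then line + 1 else line) = line :=
          if_neg (by decide)
        rw [hl] at hline'
        by_cases hd0 : depth = 0
        · have h1 : ¬ depth = 1 := by omega
          have h2 : ¬ (0 : Int) < depth := by omega
          simp only [pvAAux, pvSpans, hl, if_neg hpar, if_pos hd0, if_neg h1, if_neg h2]
          exact ih (idx + 1) depth start_line line startA startB hrest hd hinv hline'
        · obtain ⟨hsa, hsl⟩ := hinv (lt_of_le_of_ne hd (Ne.symm hd0))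
          by_cases hd1 : depth = 1
          · have hcond : depth - 1 = 0 ∧ 0 ≤ startA :=
              ⟨by omega, by rw [hsa]; exact Int.natCast_nonneg _⟩
            have hz : depth - 1 = 0 := hcond.1
            simp only [pvAAux, pvSpans, hl, if_neg hpar,
              if_neg hd0, if_pos hd1, hz]
            have hrec := ih (idx + 1) 0 start_line line (-1) startB hrest le_rfl
              (fun h => absurd h (lt_irrefl 0)) hline'
            rw [hrec, hsa, hsl]
            simp [pvEmit_cons]
          · have hcond : ¬ (depth - 1 = 0 ∧ 0 ≤ startA) := by
              intro hh; exact hd1 (by omega)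
            have hpos : (0 : Int) < depth := lt_of_le_of_ne hd (Ne.symm hd0)
            simp only [pvAAux, pvSpans, hl, if_neg hpar,
              if_neg hd0, if_neg hcond, if_neg hd1, if_pos hpos]
            exact ih (idx + 1) (depth - 1) start_line line startA startB hrest (by omega)
              (fun _ => ⟨hsa, hsl⟩) hline'
      · -- ordinary character
        simp only [pvAAux, pvSpans, if_neg hpar, if_neg hclo]
        exact ih (idx + 1) depth start_line _ startA startB hrest hd hinv hline'

-- ===== VERDICT (by name: the statement is the Claim_ definition above) =====
theorem iter_top_level_atoms_py_spec : Claim_equal_iter_top_level_atoms_py := by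
  intro text _
  unfold Spec_iter_top_level_atoms_py iter_top_level_atoms_py iter_top_level_atoms_py_alt
  exact pv_main text.toList text.toList 0 0 1 1 (-1) 0 rfl le_rfl
    (fun h => absurd h (lt_irrefl 0)) (by simp)
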